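-- pv_equiv track=rewrite | github.com/riccoljy/CS1010X | Past Year PEs/CS1010S 2017 Apr/template (1).py | advance_l33tify
-- ===== SOURCE A (Python) =====
-- def advance_l33tify(string, code):
--     temp = code.copy()
--     string = string.lower()
--     res = ""
--     for letter in string:
--         if letter not in code:
--             res += letter
--             continue
--         replacement = temp[letter][0]
--         temp[letter] = temp[letter][1:]+temp[letter][:1]
--         res += replacement
--     return res
-- ===== SOURCE B (Python) =====
-- def advance_l33tify(string, code):
--     s = string.lower()
--     positions = {}
--     for i, ch in enumerate(s):
--         if ch in code:
--             positions.setdefault(ch, []).append(i)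
--     result = list(s)
--     for ch, idxs in positions.items():
--         repl = code[ch]
--         n = len(repl)
--         for j, pos in enumerate(idxs):
--             result[pos] = repl[j % n]
--     return "".join(result)
-- ===== Notes on version B (the rewrite author's own statement) =====
-- stated objective: alternative
-- what changed: A makes one pass over the string, mutating a copied dict by rotating each replacement string one step per use; B instead builds an index table of each coded letter's occurrence positions, then scatters the cycled replacement characters (repl[j % n]) into a result list and joins it.
-- outside the precondition, e.g. on advance_l33tify('aa', {'a': ''}): A raises IndexError, B raises ZeroDivisionError
import Mathlib
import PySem

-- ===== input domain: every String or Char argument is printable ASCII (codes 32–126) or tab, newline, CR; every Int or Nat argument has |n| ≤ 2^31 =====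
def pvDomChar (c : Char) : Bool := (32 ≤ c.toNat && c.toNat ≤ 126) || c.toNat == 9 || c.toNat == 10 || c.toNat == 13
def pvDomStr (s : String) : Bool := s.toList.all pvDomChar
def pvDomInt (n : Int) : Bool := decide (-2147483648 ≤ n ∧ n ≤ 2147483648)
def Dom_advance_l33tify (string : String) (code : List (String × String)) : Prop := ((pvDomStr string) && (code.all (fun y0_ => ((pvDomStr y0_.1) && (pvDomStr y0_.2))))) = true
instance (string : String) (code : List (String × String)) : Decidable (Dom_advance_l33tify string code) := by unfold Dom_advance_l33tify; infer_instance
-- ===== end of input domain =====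

-- B replaces A's single pass (which rotates replacement strings inside a mutated dict copy) by an
-- index table: group the occurrence positions of each coded letter once, then scatter the cycled
-- replacement characters into a result list (objective: alternative decomposition, same cost).

-- ===== PORT A =====
-- loop body of A: `for letter in string: …` carrying (temp, res); res is kept as List Char
def pvStepA (code : List (String × String)) (st : PySem.Dict String String × List Char)
    (letter : Char) : PySem.Dict String String × List Char :=
  if (PySem.Dict.ofList code).contains (String.ofList [letter]) = false then
    (st.1, st.2 ++ [letter])                                   -- letter not in code: res += letter
  else
    match (st.1.getD (String.ofList [letter]) "").toList with
    | [] => st                                                 -- unreachable under Pre_ (Python raises IndexError)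
    | c :: rest =>                                             -- replacement = temp[letter][0]
        (st.1.insert (String.ofList [letter]) (String.ofList (rest ++ [c])),  -- temp[letter] = temp[letter][1:]+temp[letter][:1]
         st.2 ++ [c])                                          -- res += replacement

def advance_l33tify (string : String) (code : List (String × String)) : String :=
  String.ofList (((PySem.Str.lower string).toList.foldl (pvStepA code)
    (PySem.Dict.ofList code, [])).2)

-- ===== PORT B =====
-- B phase 1 loop body: positions.setdefault(ch, []).append(i)  (only for coded letters)
def pvGroupB (code : List (String × String)) (p : PySem.Dict Char (List Int))
    (ic : Int × Char) : PySem.Dict Char (List Int) :=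
  if (PySem.Dict.ofList code).contains (String.ofList [ic.2]) then
    p.modify ic.2 [] (· ++ [ic.1])
  else p

-- B inner loop body: result[pos] = repl[j % n]
def pvSetB (repl : List Char) (n : Int) (r : List Char) (jp : Int × Int) : List Char :=
  PySem.List.pySetD r jp.2 (PySem.List.pyGetD repl (PySem.Int.mod jp.1 n) ' ')

-- B outer loop body: for ch, idxs in positions.items(): …
def pvApplyB (code : List (String × String)) (res : List Char) (kv : Char × List Int) : List Char :=
  let repl := ((PySem.Dict.ofList code).getD (String.ofList [kv.1]) "").toList
  (PySem.List.enumerate kv.2 0).foldl (pvSetB repl (PySem.List.len repl)) res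

def advance_l33tify_alt (string : String) (code : List (String × String)) : String :=
  let s := (PySem.Str.lower string).toList
  let positions := (PySem.List.enumerate s 0).foldl (pvGroupB code) PySem.Dict.empty
  String.ofList (positions.items.foldl (pvApplyB code) s)

-- ===== PRECONDITION & SPEC =====
-- Pre_ excludes exactly the inputs on which A raises IndexError: some character of the lowered
-- string is a key of `code` whose replacement string is empty (B raises ZeroDivisionError there).
def Pre_advance_l33tify (string : String) (code : List (String × String)) : Prop :=
  ((PySem.Chars.lower string.toList).all
    (fun c => (PySem.Dict.ofList code).get? (String.ofList [c]) != some "")) = true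
instance (string : String) (code : List (String × String)) : Decidable (Pre_advance_l33tify string code) := by unfold Pre_advance_l33tify; infer_instance

def pvWitness_advance_l33tify : String × (List (String × String)) :=
  ("Leet claN!", [("e", "3"), ("t", "7+"), ("n", "N")])

def Spec_advance_l33tify (string : String) (code : List (String × String)) (out : String) : Prop := out = advance_l33tify_alt string code
instance (string : String) (code : List (String × String)) (out : String) : Decidable (Spec_advance_l33tify string code out) := by unfold Spec_advance_l33tify; infer_instance

-- ===== CLAIM (what is proved, stated in full; the proofs are below) =====
def Claim_equal_advance_l33tify : Prop := ∀ (string : String) (code : List (String × String)), Dom_advance_l33tify string code → Pre_advance_l33tify string code → Spec_advance_l33tify string code (advance_l33tify string code)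

-- ===== LEMMAS AND PROOFS =====

-- abbreviations for the proof (not used by the ports)
def pvMk1 (c : Char) : String := String.ofList [c]
def pvHas (code : List (String × String)) (c : Char) : Bool :=
  (PySem.Dict.ofList code).contains (pvMk1 c)
def pvV (code : List (String × String)) (c : Char) : List Char :=
  ((PySem.Dict.ofList code).getD (pvMk1 c) "").toList
-- the value of temp[letter] after k uses: l rotated k steps
def pvRotN (k : Nat) (l : List Char) : List Char :=
  l.drop (k % l.length) ++ l.take (k % l.length)
-- the character substituted for the (k+1)-st occurrence of letter c
def pvGc (code : List (String × String)) (c : Char) (k : Nat) : Char :=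
  (pvV code c).getD (k % (pvV code c).length) ' '
def pvBump (cnt : Char → Nat) (ch : Char) : Char → Nat :=
  fun c => if c = ch then cnt c + 1 else cnt c
-- common specification both ports are proved equal to
def pvSpecGo (code : List (String × String)) (cnt : Char → Nat) : List Char → List Char
  | [] => []
  | ch :: rest =>
      (if pvHas code ch then pvGc code ch (cnt ch) else ch) :: pvSpecGo code (pvBump cnt ch) rest

lemma pvMk1_inj {c d : Char} (h : c ≠ d) : pvMk1 c ≠ pvMk1 d := by
  intro he; exact h (by have := congrArg String.toList he; simpa [pvMk1] using this)

lemma pvRotN_cons (l : List Char) (h : l ≠ []) (k : Nat) :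
    pvRotN k l = l.getD (k % l.length) ' ' ::
      (l.drop (k % l.length + 1) ++ l.take (k % l.length)) := by
  have hlen : 0 < l.length := List.length_pos_iff.mpr h
  have hr : k % l.length < l.length := Nat.mod_lt _ hlen
  simp only [pvRotN]
  rw [List.drop_eq_getElem_cons hr, List.getD_eq_getElem l ' ' hr]
  simp only [List.cons_append]

lemma pvRotN_rot (l : List Char) (h : l ≠ []) (k : Nat) :
    (l.drop (k % l.length + 1) ++ l.take (k % l.length)) ++ [l.getD (k % l.length) ' '] =
      pvRotN (k + 1) l := by
  have hlen : 0 < l.length := List.length_pos_iff.mpr h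
  have hr : k % l.length < l.length := Nat.mod_lt _ hlen
  have hmod : (k + 1) % l.length = (k % l.length + 1) % l.length := by
    rw [Nat.mod_add_mod]
  have htake : l.take (k % l.length) ++ [l.getD (k % l.length) ' '] = l.take (k % l.length + 1) := by
    rw [List.getD_eq_getElem l ' ' hr, List.take_succ_eq_append_getElem hr]
  by_cases hcase : k % l.length + 1 = l.length
  · have h1 : (k + 1) % l.length = 0 := by rw [hmod, hcase, Nat.mod_self]
    simp only [pvRotN, h1, List.drop_zero, List.take_zero, List.append_nil]
    rw [List.append_assoc, htake, hcase]
    simp [List.drop_length]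
  · have hlt : k % l.length + 1 < l.length := lt_of_le_of_ne hr hcase
    have h1 : (k + 1) % l.length = k % l.length + 1 := by
      rw [hmod, Nat.mod_eq_of_lt hlt]
    simp only [pvRotN, h1]
    rw [List.append_assoc, htake]

-- A's loop: invariant = every coded letter's entry in temp is its replacement rotated (cnt c) steps
lemma pvA_loop (code : List (String × String)) (s : List Char)
    (temp : PySem.Dict String String) (res : List Char) (cnt : Char → Nat)
    (hv : ∀ c ∈ s, pvHas code c = true →
        (temp.getD (pvMk1 c) "").toList = pvRotN (cnt c) (pvV code c) ∧ pvV code c ≠ []) :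
    (s.foldl (pvStepA code) (temp, res)).2 = res ++ pvSpecGo code cnt s := by
  induction s generalizing temp res cnt with
  | nil => simp [pvSpecGo]
  | cons ch s' ih =>
    simp only [List.foldl_cons]
    by_cases hc : pvHas code ch = true
    · obtain ⟨hval, hne⟩ := hv ch (List.mem_cons_self) hc
      have hcon : (PySem.Dict.ofList code).contains (String.ofList [ch]) = true := hc
      have hstep : pvStepA code (temp, res) ch =
          (temp.insert (pvMk1 ch)
            (String.ofList ((List.drop (cnt ch % (pvV code ch).length + 1) (pvV code ch) ++
              List.take (cnt ch % (pvV code ch).length) (pvV code ch)) ++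
              [(pvV code ch).getD (cnt ch % (pvV code ch).length) ' '])),
           res ++ [(pvV code ch).getD (cnt ch % (pvV code ch).length) ' ']) := by
        simp only [pvStepA, pvMk1, hcon]
        rw [show (temp.getD (String.ofList [ch]) "").toList = pvRotN (cnt ch) (pvV code ch) from hval,
            pvRotN_cons _ hne (cnt ch)]
        simp
      rw [hstep, ih _ _ (pvBump cnt ch) ?hinv]
      · simp only [pvSpecGo, hc, if_pos, pvGc, List.append_assoc, List.cons_append,
          List.nil_append]
      case hinv =>
        intro c hcs hhc
        refine ⟨?_, (hv c (List.mem_cons_of_mem _ hcs) hhc).2⟩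
        by_cases hceq : c = ch
        · subst hceq
          rw [PySem.Dict.getD_insert_self]
          have : pvBump cnt c c = cnt c + 1 := by simp [pvBump]
          rw [this, ← pvRotN_rot _ hne (cnt c)]
          simp
        · rw [PySem.Dict.getD_insert_of_ne _ _ _ (pvMk1_inj hceq)]
          have : pvBump cnt ch c = cnt c := by simp [pvBump, hceq]
          rw [this]
          exact (hv c (List.mem_cons_of_mem _ hcs) hhc).1
    · have hcon : (PySem.Dict.ofList code).contains (String.ofList [ch]) = false := by
        simpa [pvHas, pvMk1] using hc
      have hstep : pvStepA code (temp, res) ch = (temp, res ++ [ch]) := by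
        simp [pvStepA, hcon]
      rw [hstep, ih _ _ (pvBump cnt ch) ?hinv2]
      · simp only [pvSpecGo, hc, if_neg, Bool.false_eq_true, not_false_iff,
          List.append_assoc, List.cons_append, List.nil_append]
      case hinv2 =>
        intro c hcs hhc
        have hceq : c ≠ ch := by rintro rfl; simp [hhc] at hc
        have : pvBump cnt ch c = cnt c := by simp [pvBump, hceq]
        rw [this]
        exact hv c (List.mem_cons_of_mem _ hcs) hhc

-- occurrence positions of c in s, numbered from t (the value B's phase 1 stores for key c)
def pvOccs (s : List Char) (t : Nat) (c : Char) : List Nat :=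
  match s with
  | [] => []
  | x :: xs => (if x == c then [t] else []) ++ pvOccs xs (t + 1) c

def pvPos (s : List Char) (t : Int) (c : Char) : List Int :=
  ((PySem.List.enumerate s t).filter (fun ic => ic.2 == c)).map (·.1)

lemma pvPos_eq (s : List Char) (t : Nat) (c : Char) :
    pvPos s (t : Int) c = (pvOccs s t c).map (fun n => (n : Int)) := by
  induction s generalizing t with
  | nil => simp [pvPos, pvOccs, PySem.List.enumerate]
  | cons x xs ih =>
    have hrec : PySem.List.enumerate (x :: xs) (t : Int) =
        ((t : Int), x) :: PySem.List.enumerate xs ((t + 1 : Nat) : Int) := by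
      rw [PySem.List.enumerate_cons]; norm_num
    simp only [pvPos] at ih ⊢
    rw [hrec, List.filter_cons]
    simp only [pvOccs]
    by_cases hx : (x == c) = true
    · rw [if_pos hx, if_pos hx]
      simp only [List.map_cons, List.singleton_append]
      exact congrArg (List.cons _) (ih (t + 1))
    · rw [if_neg hx, if_neg hx]
      simp only [List.nil_append]
      exact ih (t + 1)

lemma pvOccs_ge (s : List Char) (t : Nat) (c : Char) :
    ∀ i ∈ pvOccs s t c, t ≤ i ∧ i < t + s.length := by
  induction s generalizing t with
  | nil => simp [pvOccs]
  | cons x xs ih =>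
    intro i hi
    simp only [pvOccs, List.mem_append] at hi
    rcases hi with hi | hi
    · by_cases hx : (x == c) = true
      · have hit : i = t := by simpa [hx] using hi
        subst hit
        simp only [List.length_cons]
        omega
      · simp [hx] at hi
    · have := ih (t + 1) i hi
      simp only [List.length_cons]
      omega

lemma pvOccs_nodup (s : List Char) (t : Nat) (c : Char) : (pvOccs s t c).Nodup := by
  induction s generalizing t with
  | nil => simp [pvOccs]
  | cons x xs ih =>
    by_cases hx : (x == c) = true
    · simp only [pvOccs, hx, if_true, List.singleton_append, List.nodup_cons]
      refine ⟨fun hmem => ?_, ih (t + 1)⟩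
      have := pvOccs_ge xs (t + 1) c t hmem
      omega
    · simpa [pvOccs, hx] using ih (t + 1)

lemma pvOccs_mem (s : List Char) (t : Nat) (c : Char) (k : Nat) (hk : k < s.length) :
    (t + k) ∈ pvOccs s t c ↔ s[k] = c := by
  induction s generalizing t k with
  | nil => simp at hk
  | cons x xs ih =>
    cases k with
    | zero =>
      simp only [Nat.add_zero, List.getElem_cons_zero]
      constructor
      · intro hmem
        simp only [pvOccs, List.mem_append] at hmem
        rcases hmem with hm | hm
        · by_cases hx : (x == c) = true
          · exact beq_iff_eq.mp hx
          · simp [hx] at hm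
        · have := pvOccs_ge xs (t + 1) c t hm; omega
      · intro hxc
        subst hxc
        simp [pvOccs]
    | succ k' =>
      have hk' : k' < xs.length := by simpa using hk
      have h1 : t + (k' + 1) = (t + 1) + k' := by omega
      simp only [List.getElem_cons_succ]
      rw [← ih (t + 1) k' hk', ← h1]
      constructor
      · intro hmem
        simp only [pvOccs, List.mem_append] at hmem
        rcases hmem with hm | hm
        · by_cases hx : (x == c) = true
          · simp [hx] at hm
          · simp [hx] at hm
        · exact hm
      · intro hmem
        simp only [pvOccs, List.mem_append]
        exact Or.inr hmem

lemma pvOccs_idxOf (s : List Char) (t : Nat) (c : Char) (k : Nat) (hk : k < s.length)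
    (h : s[k] = c) : (pvOccs s t c).idxOf (t + k) = (s.take k).count c := by
  induction s generalizing t k with
  | nil => simp at hk
  | cons x xs ih =>
    cases k with
    | zero =>
      have hxc : x = c := by simpa using h
      subst hxc
      simp [pvOccs]
    | succ k' =>
      have hk' : k' < xs.length := by simpa using hk
      have hc' : xs[k'] = c := by simpa using h
      have h1 : t + (k' + 1) = (t + 1) + k' := by omega
      by_cases hx : (x == c) = true
      · have hxc : x = c := beq_iff_eq.mp hx
        simp only [pvOccs, hx, if_true, List.singleton_append]
        rw [List.idxOf_cons_ne _ (by omega), h1, ih (t + 1) k' hk' hc']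
        simp [hxc]
      · simp only [pvOccs, hx, Bool.false_eq_true, if_false, List.nil_append]
        rw [h1, ih (t + 1) k' hk' hc']
        have hxc : ¬ x = c := by simpa using hx
        simp [hxc]

-- B's inner loop: scattered writes at distinct positions, read back
lemma pvInner_len (repl : List Char) (n : Int) (ps : List Int) (res : List Char) (j₀ : Int) :
    ((PySem.List.enumerate ps j₀).foldl (pvSetB repl n) res).length = res.length := by
  induction ps generalizing res j₀ with
  | nil => simp [PySem.List.enumerate]
  | cons p ps ih =>
    rw [PySem.List.enumerate_cons]
    simp only [List.foldl_cons]
    rw [ih]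
    simp [pvSetB, PySem.List.length_pySetD]

lemma pvInner_get (repl : List Char) (n : Int) (ps : List Nat) (res : List Char) (j₀ : Nat)
    (hnd : ps.Nodup) (hlt : ∀ p ∈ ps, p < res.length) (i : Nat) :
    ((PySem.List.enumerate (ps.map (fun m => (m : Int))) (j₀ : Int)).foldl
      (pvSetB repl n) res)[i]? =
    if i ∈ ps then
      some (PySem.List.pyGetD repl (PySem.Int.mod ((j₀ + ps.idxOf i : Nat) : Int) n) ' ')
    else res[i]? := by
  induction ps generalizing res j₀ with
  | nil => simp
  | cons p ps ih =>
    obtain ⟨hp, hnd'⟩ := List.nodup_cons.mp hnd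
    rw [show (p :: ps).map (fun m => (m : Int)) = (p : Int) :: ps.map (fun m => (m : Int)) from rfl,
        PySem.List.enumerate_cons]
    simp only [List.foldl_cons]
    have hplt : p < res.length := hlt p List.mem_cons_self
    have hstep : pvSetB repl n res ((j₀ : Int), (p : Int)) =
        res.set p (PySem.List.pyGetD repl (PySem.Int.mod (j₀ : Int) n) ' ') := by
      simp [pvSetB, PySem.List.pySetD_natCast]
    have hcast : ((j₀ : Int) + 1) = ((j₀ + 1 : Nat) : Int) := by push_cast; ring
    have hlt' : ∀ q ∈ ps, q < (res.set p (PySem.List.pyGetD repl (PySem.Int.mod (j₀ : Int) n) ' ')).length := by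
      intro q hq
      simpa using hlt q (List.mem_cons_of_mem _ hq)
    rw [hstep, hcast, ih _ (j₀ + 1) hnd' hlt']
    by_cases hip : i = p
    · subst hip
      rw [if_neg (by exact fun h => hp h), if_pos List.mem_cons_self,
          List.idxOf_cons_self, List.getElem?_set_self hplt]
      simp
    · by_cases hin : i ∈ ps
      · rw [if_pos hin, if_pos (List.mem_cons_of_mem _ hin),
            List.idxOf_cons_ne _ (fun h => hip h.symm)]
        have harith : (j₀ + 1) + ps.idxOf i = j₀ + (ps.idxOf i + 1) := by omega
        rw [harith]
      · rw [if_neg hin, if_neg (by simp [hip, hin]),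
            List.getElem?_set_ne (fun h => hip h.symm)]

-- one key's pass over the result list
lemma pvApplyB_get (code : List (String × String)) (s res : List Char) (c : Char)
    (hlen : res.length = s.length) (i : Nat) (hi : i < s.length) :
    (pvApplyB code res (c, pvPos s 0 c))[i]? =
      if s[i] = c then some (pvGc code c ((s.take i).count c)) else res[i]? := by
  have h0 : pvPos s 0 c = (pvOccs s 0 c).map (fun m => (m : Int)) := by
    simpa using pvPos_eq s 0 c
  have hlt : ∀ p ∈ pvOccs s 0 c, p < res.length := by
    intro p hp
    have := pvOccs_ge s 0 c p hp
    omega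
  simp only [pvApplyB]
  rw [h0, show (0 : Int) = ((0 : Nat) : Int) from by simp,
      pvInner_get _ _ _ _ _ (pvOccs_nodup s 0 c) hlt i]
  by_cases hsc : s[i] = c
  · have hmem : i ∈ pvOccs s 0 c := by
      have := (pvOccs_mem s 0 c i hi).mpr hsc
      simpa using this
    have hidx : (pvOccs s 0 c).idxOf i = (s.take i).count c := by
      have := pvOccs_idxOf s 0 c i hi hsc
      simpa using this
    rw [if_pos hmem, if_pos hsc, hidx, PySem.List.len_eq, PySem.Int.mod_natCast,
        PySem.List.pyGetD_natCast, Nat.zero_add]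
    rfl
  · have hmem : i ∉ pvOccs s 0 c := by
      intro hmem'
      exact hsc ((pvOccs_mem s 0 c i hi).mp (by simpa using hmem'))
    rw [if_neg hmem, if_neg hsc]

lemma pvApplyB_len (code : List (String × String)) (res : List Char) (kv : Char × List Int) :
    (pvApplyB code res kv).length = res.length := by
  simp only [pvApplyB]
  rw [pvInner_len]

-- B's phase 1 loop rewritten as a grouping fold over the coded-letter occurrences (key, index)
lemma pvPositions_eq (code : List (String × String)) (s : List Char) :
    (PySem.List.enumerate s 0).foldl (pvGroupB code) PySem.Dict.empty =
    (((PySem.List.enumerate s 0).filter (fun ic => pvHas code ic.2)).map Prod.swap).foldl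
      (fun d q => d.modify q.1 [] (· ++ [q.2])) PySem.Dict.empty := by
  conv_rhs => rw [List.foldl_map, List.foldl_filter]
  rfl

-- B's phase 1 result: value stored at key c is pvPos s 0 c, keys = coded letters of s
lemma pvPositions_getD (code : List (String × String)) (s : List Char) (c : Char)
    (hc : pvHas code c = true) :
    ((PySem.List.enumerate s 0).foldl (pvGroupB code) PySem.Dict.empty).getD c [] =
      pvPos s 0 c := by
  rw [pvPositions_eq, PySem.Dict.getD_foldl_modify_append]
  rw [List.filter_map, List.map_map]
  have hf1 : ((fun (p : Char × Int) => p.1 == c) ∘ Prod.swap) =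
      fun (ic : Int × Char) => ic.2 == c := rfl
  have hf2 : ((fun (p : Char × Int) => p.2) ∘ Prod.swap) =
      fun (ic : Int × Char) => ic.1 := rfl
  rw [hf1, hf2, List.filter_filter]
  have hpred : (fun (a : Int × Char) => (a.2 == c) && pvHas code a.2) =
      fun (a : Int × Char) => a.2 == c := by
    funext a
    by_cases h : a.2 = c
    · simp [h, hc]
    · simp [h]
  rw [hpred]
  simp [pvPos]

lemma pvPositions_keys (code : List (String × String)) (s : List Char) :
    ((PySem.List.enumerate s 0).foldl (pvGroupB code) PySem.Dict.empty).keys =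
      PySem.Set.ofList ((((PySem.List.enumerate s 0).filter
        (fun ic => pvHas code ic.2)).map (·.2))) := by
  rw [pvPositions_eq, PySem.Dict.keys_foldl_modify_key]
  rw [List.map_map]
  have hf : ((fun (q : Char × Int) => q.1) ∘ Prod.swap) =
      fun (ic : Int × Char) => ic.2 := rfl
  rw [hf]
  simp [PySem.Set.update_nil_left]

lemma pvPositions_nodup (code : List (String × String)) (s : List Char) :
    ((PySem.List.enumerate s 0).foldl (pvGroupB code) PySem.Dict.empty).keys.Nodup := by
  rw [pvPositions_eq]
  exact PySem.Dict.nodup_keys_foldl_modify_key _ _ _ _ _ (by simp)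

-- B's outer loop over the distinct coded letters
lemma pvOuter (code : List (String × String)) (s : List Char) (K : List Char)
    (P : Char → List Int) (hP : ∀ c ∈ K, P c = pvPos s 0 c)
    (hK : ∀ c ∈ K, c ∈ s) (res : List Char) (hlen : res.length = s.length)
    (i : Nat) (hi : i < s.length) :
    ((K.foldl (fun r c => pvApplyB code r (c, P c)) res)[i]? =
      if s[i] ∈ K then some (pvGc code (s[i]) ((s.take i).count (s[i]))) else res[i]?) ∧
    (K.foldl (fun r c => pvApplyB code r (c, P c)) res).length = s.length := by
  induction K generalizing res with
  | nil => simp [hlen]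
  | cons c K' ih =>
    simp only [List.foldl_cons]
    have hPc : P c = pvPos s 0 c := hP c List.mem_cons_self
    have hlen' : (pvApplyB code res (c, P c)).length = s.length := by
      rw [pvApplyB_len, hlen]
    have hget : (pvApplyB code res (c, P c))[i]? =
        if s[i] = c then some (pvGc code c ((s.take i).count c)) else res[i]? := by
      rw [hPc]
      exact pvApplyB_get code s res c hlen i hi
    obtain ⟨ih1, ih2⟩ := ih (fun d hd => hP d (List.mem_cons_of_mem _ hd))
      (fun d hd => hK d (List.mem_cons_of_mem _ hd)) _ hlen'
    refine ⟨?_, ih2⟩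
    rw [ih1]
    by_cases h1 : s[i] ∈ K'
    · rw [if_pos h1, if_pos (List.mem_cons_of_mem _ h1)]
    · rw [if_neg h1, hget]
      by_cases h2 : s[i] = c
      · rw [if_pos h2, if_pos (by simp [h2]), h2]
      · rw [if_neg h2, if_neg (by simp [h2, h1])]

lemma pvOuter_len (code : List (String × String)) (K : List Char) (P : Char → List Int)
    (res : List Char) :
    (K.foldl (fun r c => pvApplyB code r (c, P c)) res).length = res.length := by
  induction K generalizing res with
  | nil => rfl
  | cons c K' ih =>
    simp only [List.foldl_cons]
    rw [ih, pvApplyB_len]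

lemma pvKeys_mem (code : List (String × String)) (s : List Char) (c : Char) :
    c ∈ ((PySem.List.enumerate s 0).foldl (pvGroupB code) PySem.Dict.empty).keys ↔
      c ∈ s ∧ pvHas code c = true := by
  rw [pvPositions_keys, PySem.Set.mem_ofList]
  constructor
  · intro h
    obtain ⟨ic, hic, hrfl⟩ := List.mem_map.mp h
    obtain ⟨hmem, hhas⟩ := List.mem_filter.mp hic
    obtain ⟨k, hk, hrfl2⟩ := (PySem.List.mem_enumerate_iff _ _ _).mp hmem
    subst hrfl
    subst hrfl2
    exact ⟨List.getElem_mem hk, hhas⟩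
  · rintro ⟨hcs, hhas⟩
    obtain ⟨k, hk, hrfl⟩ := List.mem_iff_getElem.mp hcs
    refine List.mem_map.mpr ⟨((0 + k : Int), s[k]), List.mem_filter.mpr ⟨?_, ?_⟩, hrfl⟩
    · exact (PySem.List.mem_enumerate_iff _ _ _).mpr ⟨k, hk, rfl⟩
    · simpa [hrfl] using hhas

lemma pvSpecGo_len (code : List (String × String)) (cnt : Char → Nat) (s : List Char) :
    (pvSpecGo code cnt s).length = s.length := by
  induction s generalizing cnt with
  | nil => simp [pvSpecGo]
  | cons ch rest ih => simp [pvSpecGo, ih]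

lemma pvSpecGo_get (code : List (String × String)) (s : List Char) (cnt : Char → Nat)
    (i : Nat) (hi : i < s.length) :
    (pvSpecGo code cnt s)[i]? =
      some (if pvHas code (s[i]) then pvGc code (s[i]) (cnt (s[i]) + (s.take i).count (s[i]))
            else s[i]) := by
  induction s generalizing cnt i with
  | nil => simp at hi
  | cons ch rest ih =>
    cases i with
    | zero => simp [pvSpecGo]
    | succ i' =>
      have hi' : i' < rest.length := by simpa using hi
      simp only [pvSpecGo, List.getElem?_cons_succ, List.getElem_cons_succ]
      rw [ih (pvBump cnt ch) i' hi']
      have hcnt : pvBump cnt ch (rest[i']) + (rest.take i').count (rest[i']) =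
          cnt (rest[i']) + (((ch :: rest).take (i' + 1)).count (rest[i'])) := by
        rw [List.take_succ_cons]
        by_cases h : rest[i'] = ch
        · simp [pvBump, h, List.count_cons]; omega
        · have hch : ¬ ch = rest[i'] := fun he => h he.symm
          simp [pvBump, h, List.count_cons, hch]
      rw [hcnt]

-- ===== VERDICT (by name: the statement is the Claim_ definition above) =====
theorem advance_l33tify_spec : Claim_equal_advance_l33tify := by
  intro string code _hdom hpre
  show advance_l33tify string code = advance_l33tify_alt string code
  set s := (PySem.Str.lower string).toList with hs
  have hpre' : ∀ c ∈ s, (PySem.Dict.ofList code).get? (String.ofList [c]) ≠ some "" := by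
    intro c hc
    have hc2 : c ∈ PySem.Chars.lower string.toList := by
      rw [← PySem.Str.toList_lower]; exact hc
    have := List.all_eq_true.mp hpre c hc2
    simpa using this
  have hval : ∀ c ∈ s, pvHas code c = true →
      ((PySem.Dict.ofList code).getD (pvMk1 c) "").toList = pvRotN 0 (pvV code c) ∧
        pvV code c ≠ [] := by
    intro c hc hhas
    have hsome : ((PySem.Dict.ofList code).get? (pvMk1 c)).isSome := by
      rw [← PySem.Dict.contains_eq_isSome_get?]; exact hhas
    obtain ⟨w, hw⟩ := Option.isSome_iff_exists.mp hsome
    have hwne : w ≠ "" := fun h => hpre' c hc (h ▸ hw)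
    have hgetD : (PySem.Dict.ofList code).getD (pvMk1 c) "" = w :=
      PySem.Dict.getD_of_get?_eq_some _ _ hw
    have hvw : pvV code c = w.toList := by rw [pvV, hgetD]
    have hvne : pvV code c ≠ [] := by
      rw [hvw]
      intro he
      apply hwne
      rw [← String.toList_inj]
      simpa using he
    refine ⟨?_, hvne⟩
    rw [pvRotN, Nat.zero_mod]
    simp [pvV, hgetD]
  have hA : advance_l33tify string code = String.ofList (pvSpecGo code (fun _ => 0) s) := by
    simp only [advance_l33tify, ← hs]
    rw [pvA_loop code s (PySem.Dict.ofList code) [] (fun _ => 0) hval, List.nil_append]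
  have hB : advance_l33tify_alt string code = String.ofList (pvSpecGo code (fun _ => 0) s) := by
    simp only [advance_l33tify_alt, ← hs]
    refine congrArg String.ofList ?_
    rw [PySem.Dict.items_eq_map_keys _ (pvPositions_nodup code s) [], List.foldl_map]
    have houter := pvOuter code s
      ((PySem.List.enumerate s 0).foldl (pvGroupB code) PySem.Dict.empty).keys
      (fun c => ((PySem.List.enumerate s 0).foldl (pvGroupB code) PySem.Dict.empty).getD c [])
      (fun c hc => pvPositions_getD code s c ((pvKeys_mem code s c).mp hc).2)
      (fun c hc => ((pvKeys_mem code s c).mp hc).1) s rfl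
    apply List.ext_getElem?
    intro i
    by_cases hi : i < s.length
    · rw [(houter i hi).1, pvSpecGo_get code s _ i hi]
      by_cases hmem : s[i] ∈ ((PySem.List.enumerate s 0).foldl (pvGroupB code) PySem.Dict.empty).keys
      · have hhas := ((pvKeys_mem code s _).mp hmem).2
        rw [if_pos hmem]
        simp [hhas]
      · have hnot : ¬ pvHas code (s[i]) = true := by
          intro h
          exact hmem ((pvKeys_mem code s _).mpr ⟨List.getElem_mem hi, h⟩)
        rw [if_neg hmem]
        simp only [if_neg hnot]
        rw [List.getElem?_eq_getElem hi]
    · have h1 : s.length ≤ i := Nat.le_of_not_lt hi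
      rw [List.getElem?_eq_none (by rw [pvOuter_len]; exact h1),
          List.getElem?_eq_none (by rw [pvSpecGo_len]; exact h1)]
  rw [hA, hB]
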